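-- pv_equiv track=rewrite | github.com/Dodzik/Language_Python | lab07/lab7.py | howmanyzeros
-- ===== SOURCE A (Python) =====
-- def howmanyzeros(chain):
-- 	count=0
-- 	for i in chain:
-- 		if i:
-- 			yield count
-- 			count=0
-- 		else:
-- 			count+=1
-- ===== SOURCE B (Python) =====
-- def howmanyzeros(chain):
--     # Two-stage: collect the indices of the truthy elements, then the run of
--     # falsy values before each truthy element is the gap between consecutive
--     # truthy indices (with a virtual truthy at index -1). A trailing falsy run
--     # has no following truthy index, so it is never emitted, just like A.
--     items = list(chain)
--     idxs = [i for i, x in enumerate(items) if x]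
--     for prev, cur in zip([-1] + idxs, idxs):
--         yield cur - prev - 1
-- ===== Notes on version B (the rewrite author's own statement) =====
-- stated objective: alternative
-- what changed: Replaces the single pass with a running falsy-counter by two staged passes: first collect the list of truthy-element indices, then yield the gap between consecutive truthy indices (with a virtual truthy at -1) via zip, which drops the trailing falsy run for free.
import Mathlib
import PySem

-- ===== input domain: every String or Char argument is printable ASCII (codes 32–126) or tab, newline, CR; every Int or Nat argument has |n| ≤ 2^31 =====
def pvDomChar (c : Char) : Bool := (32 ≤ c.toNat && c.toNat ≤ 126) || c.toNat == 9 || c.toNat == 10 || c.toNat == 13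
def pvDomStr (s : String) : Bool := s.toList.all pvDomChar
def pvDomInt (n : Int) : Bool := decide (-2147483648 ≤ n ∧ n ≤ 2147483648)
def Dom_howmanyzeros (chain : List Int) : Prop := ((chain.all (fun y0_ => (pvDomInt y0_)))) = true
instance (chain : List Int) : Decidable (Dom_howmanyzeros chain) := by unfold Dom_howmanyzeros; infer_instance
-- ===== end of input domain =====

-- B replaces A's running falsy-counter by two staged passes: first the list of
-- truthy indices, then the gap between consecutive truthy indices (alternative
-- decomposition, same cost). Equivalence is about the yielded sequence.


-- ===== PORT A =====
-- single fold keeping (count, yields-so-far); truthiness of an int is ≠ 0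
def howmanyzeros (chain : List Int) : List Int :=
  (chain.foldl
    (fun (s : Int × List Int) i =>
      if i ≠ 0 then (0, s.2 ++ [s.1]) else (s.1 + 1, s.2))
    (0, [])).2

-- ===== PORT B =====
-- stage 1: indices of the truthy elements; stage 2: gaps between consecutive
-- truthy indices (with a virtual truthy at -1), via zip([-1]+idxs, idxs)
def howmanyzeros_alt (chain : List Int) : List Int :=
  let idxs : List Int :=
    ((PySem.List.enumerate chain).filter (fun p => p.2 != 0)).map (fun p => p.1)
  List.zipWith (fun prev cur => cur - prev - 1) ((-1) :: idxs) idxs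

-- ===== PRECONDITION & SPEC =====
def Spec_howmanyzeros (chain : List Int) (out : List Int) : Prop := out = howmanyzeros_alt chain
instance (chain : List Int) (out : List Int) : Decidable (Spec_howmanyzeros chain out) := by unfold Spec_howmanyzeros; infer_instance

-- ===== CLAIM (what is proved, stated in full; the proofs are below) =====
def Claim_equal_howmanyzeros : Prop := ∀ (chain : List Int), Dom_howmanyzeros chain → Spec_howmanyzeros chain (howmanyzeros chain)

-- ===== LEMMAS AND PROOFS =====
-- reference scan: run-lengths of falsy prefixes, parameterised by the running count
def howmanyzerosScan (zeros : Int) : List Int → List Int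
  | [] => []
  | x :: rest => if x ≠ 0 then zeros :: howmanyzerosScan 0 rest
                 else howmanyzerosScan (zeros + 1) rest

theorem howmanyzeros_fold_eq_scan (chain : List Int) (count : Int) (acc : List Int) :
    (chain.foldl
      (fun (s : Int × List Int) i =>
        if i ≠ 0 then (0, s.2 ++ [s.1]) else (s.1 + 1, s.2))
      (count, acc)).2 = acc ++ howmanyzerosScan count chain := by
  induction chain generalizing count acc with
  | nil => simp [howmanyzerosScan]
  | cons x rest ih =>
    rw [List.foldl_cons]
    by_cases hx : x = 0
    · simp only [hx, if_neg (by simp : ¬(0:Int) ≠ 0)]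
      rw [ih, howmanyzerosScan]
      simp
    · simp only [if_pos hx]
      rw [ih, howmanyzerosScan]
      simp only [if_pos hx, List.append_assoc, List.singleton_append]

theorem howmanyzeros_gaps_eq_scan (chain : List Int) (s last : Int) :
    List.zipWith (fun prev cur => cur - prev - 1)
        (last :: ((PySem.List.enumerate chain s).filter (fun p => p.2 != 0)).map (fun p => p.1))
        (((PySem.List.enumerate chain s).filter (fun p => p.2 != 0)).map (fun p => p.1))
      = howmanyzerosScan (s - last - 1) chain := by
  induction chain generalizing s last with
  | nil => simp [PySem.List.enumerate_nil, howmanyzerosScan]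
  | cons x rest ih =>
    rw [PySem.List.enumerate_cons, howmanyzerosScan]
    by_cases hx : x = 0
    · simp only [hx, if_neg (by simp : ¬(0:Int) ≠ 0)]
      rw [List.filter_cons]
      simp only [bne_self_eq_false, if_neg Bool.false_ne_true]
      have := ih (s + 1) last
      simpa [show s + 1 - last - 1 = s - last - 1 + 1 by ring] using this
    · simp only [if_pos hx]
      rw [List.filter_cons]
      have hb : ((s, x).2 != 0) = true := by simpa using hx
      simp only [hb]
      have := ih (s + 1) s
      simpa [show s + 1 - s - 1 = (0:Int) by ring] using this

-- ===== VERDICT (by name: the statement is the Claim_ definition above) =====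
theorem howmanyzeros_spec : Claim_equal_howmanyzeros := by
  intro chain _
  unfold Spec_howmanyzeros howmanyzeros howmanyzeros_alt
  rw [howmanyzeros_fold_eq_scan chain 0 []]
  have := howmanyzeros_gaps_eq_scan chain 0 (-1)
  simpa [show (0:Int) - (-1) - 1 = 0 by ring] using this.symm
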